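-- pv_equiv track=rewrite | github.com/GabrielGutierri/RSA | Simple_tcpServer.py | escolha_d
-- ===== SOURCE A (Python) =====
-- def escolha_d(primoComum, totient):
--     t, new_t = 0, 1
--     r, new_r = totient, primoComum
--     while new_r != 0:
--         quotient = r // new_r
--         t, new_t = new_t, t - quotient * new_t
--         r, new_r = new_r, r - quotient * new_r
--     if r > 1:
--         raise ValueError("O número não possui inverso modular")
--     return t % totient
-- ===== SOURCE B (Python) =====
-- def ext_gcd(a, b):
--     # returns (g, x, y) with a*x + b*y == g (g is the floor-division Euclid tail of (a, b))
--     if b == 0: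
--         return (a, 1, 0)
--     g, x, y = ext_gcd(b, a % b)
--     return (g, y, x - (a // b) * y)
--
--
-- def escolha_d(primoComum, totient):
--     g, x, y = ext_gcd(totient, primoComum)
--     if g > 1:
--         raise ValueError("O número não possui inverso modular")
--     return y % totient
-- ===== Notes on version B (the rewrite author's own statement) =====
-- stated objective: alternative
-- what changed: Replaces A's four-variable iterative extended-Euclid loop with a recursive ext_gcd(a,b) helper returning the Bezout triple (g,x,y), from which escolha_d takes the coefficient of primoComum.
import Mathlib
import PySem

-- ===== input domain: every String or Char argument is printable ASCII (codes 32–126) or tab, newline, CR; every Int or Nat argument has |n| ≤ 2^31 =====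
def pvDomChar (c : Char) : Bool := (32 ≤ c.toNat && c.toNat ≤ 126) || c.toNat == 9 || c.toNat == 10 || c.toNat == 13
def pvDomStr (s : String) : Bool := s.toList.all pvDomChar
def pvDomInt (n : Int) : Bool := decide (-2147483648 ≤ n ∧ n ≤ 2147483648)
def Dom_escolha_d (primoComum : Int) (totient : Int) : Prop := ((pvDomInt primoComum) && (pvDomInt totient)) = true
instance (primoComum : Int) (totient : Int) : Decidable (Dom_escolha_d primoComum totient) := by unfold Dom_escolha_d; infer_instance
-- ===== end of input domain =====

-- B replaces A's four-variable iterative loop by a recursive ext_gcd(a, b) = (g, x, y)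
-- returning Bézout coefficients; objective: alternative decomposition, same cost.
-- Termination measure for both ports: |a % b| < |b| for b ≠ 0 (Python floor mod).
theorem pvModAbsLt (a b : Int) (hb : b ≠ 0) :
    (PySem.Int.mod a b).natAbs < b.natAbs := by
  rcases lt_or_gt_of_ne hb with h | h
  · have := PySem.Int.mod_neg_bounds a h
    omega
  · have h1 := PySem.Int.mod_nonneg a h
    have h2 := PySem.Int.mod_lt a h
    omega

-- ===== PORT A =====
-- A's while loop: state (t, new_t, r, new_r); returns (final t, final r).
def escolhaLoop (t newT r newR : Int) : Int × Int :=
  if h : newR = 0 then (t, r)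
  else
    escolhaLoop newT (t - (PySem.Int.floordiv r newR) * newT)
      newR (PySem.Int.mod r newR)
termination_by newR.natAbs
decreasing_by exact pvModAbsLt r newR h

-- On the raise branch ('raise ValueError') the port returns 0; Pre_ excludes those inputs.
def escolha_d (primoComum : Int) (totient : Int) : Int :=
  let res := escolhaLoop 0 1 totient primoComum
  if res.2 > 1 then 0
  else PySem.Int.mod res.1 totient

-- ===== PORT B =====
-- ext_gcd(a, b) = (g, x, y) with a*x + b*y = g.
def extGcd (a b : Int) : Int × Int × Int :=
  if h : b = 0 then (a, 1, 0)
  else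
    let r := extGcd b (PySem.Int.mod a b)
    (r.1, r.2.2, r.2.1 - (PySem.Int.floordiv a b) * r.2.2)
termination_by b.natAbs
decreasing_by exact pvModAbsLt a b h

-- On the raise branch the port returns 0; Pre_ excludes those inputs.
def escolha_d_alt (primoComum : Int) (totient : Int) : Int :=
  let r := extGcd totient primoComum
  if r.1 > 1 then 0
  else PySem.Int.mod r.2.2 totient

-- ===== PRECONDITION & SPEC =====
-- Pre_ excludes exactly the inputs on which Python A raises: totient = 0 (ZeroDivisionError
-- in 't % totient') and the inputs where the Euclid tail exceeds 1 (explicit ValueError);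
-- that tail is gcd(primoComum, totient) when primoComum > 0, -gcd when primoComum < 0
-- (hence never a raise), and totient itself when primoComum = 0.
def Pre_escolha_d (primoComum : Int) (totient : Int) : Prop :=
  totient ≠ 0 ∧
    (primoComum < 0 ∨ (primoComum = 0 ∧ totient ≤ 1) ∨
      (primoComum > 0 ∧ Int.gcd primoComum totient = 1))
instance (primoComum : Int) (totient : Int) : Decidable (Pre_escolha_d primoComum totient) := by
  unfold Pre_escolha_d; infer_instance

def pvWitness_escolha_d : Int × Int := (7, 40)

def Spec_escolha_d (primoComum : Int) (totient : Int) (out : Int) : Prop := out = escolha_d_alt primoComum totient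
instance (primoComum : Int) (totient : Int) (out : Int) : Decidable (Spec_escolha_d primoComum totient out) := by unfold Spec_escolha_d; infer_instance

-- ===== CLAIM (what is proved, stated in full; the proofs are below) =====
def Claim_equal_escolha_d : Prop := ∀ (primoComum : Int) (totient : Int), Dom_escolha_d primoComum totient → Pre_escolha_d primoComum totient → Spec_escolha_d primoComum totient (escolha_d primoComum totient)

-- ===== LEMMAS AND PROOFS =====

-- A's loop computes the linear combination of B's Bézout coefficients.
theorem escolhaLoop_eq_extGcd (r newR : Int) : ∀ t newT : Int,
    escolhaLoop t newT r newR =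
      (t * (extGcd r newR).2.1 + newT * (extGcd r newR).2.2, (extGcd r newR).1) := by
  induction r, newR using extGcd.induct with
  | case1 a =>
    intro t newT
    rw [escolhaLoop, extGcd]
    simp
  | case2 a b h ih =>
    intro t newT
    rw [escolhaLoop, extGcd]
    simp only [h, dif_neg, not_false_iff]
    rw [ih]
    apply Prod.ext
    · simp only []
      ring
    · rfl

-- ===== VERDICT (by name: the statement is the Claim_ definition above) =====
theorem escolha_d_spec : Claim_equal_escolha_d := by
  intro p tt _ _
  unfold Spec_escolha_d escolha_d escolha_d_alt
  rw [escolhaLoop_eq_extGcd]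
  simp
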